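-- pv_equiv track=rewrite | github.com/igorvanloo/Project-Euler-Explained | Euler Problem 00115 - Counting block combinations 2.py | compute
-- ===== SOURCE A (Python) =====
-- def compute(limit):
--     iv = [1 for x in range(0,51)] + [2] + [0 for x in range(0,1000)]
--
--     n = 51
--
--     while True:
--         iv[n] = 2*iv[n-1] - iv[n-2] + iv[n-50-1]
--
--         if iv[n] > limit:
--             break
--         n += 1
--     return n-1, iv[n]
-- ===== SOURCE B (Python) =====
-- def compute(limit):
--     # Natural PE115 recurrence: grow a list f of counts, each new term is the
--     # previous term plus an inner summation over the earlier prefix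
--     # (f[n] = f[n-1] + sum(f[0..n-51])), instead of A's telescoped
--     # constant-time three-term update on a preallocated array.
--     f = [1] * 51
--     n = 51
--     while True:
--         v = f[n - 1] + sum(f[:n - 50])
--         f.append(v)
--         if v > limit:
--             return n - 1, v
--         n += 1
-- ===== Notes on version B (the rewrite author's own statement) =====
-- stated objective: alternative
-- what changed: Replaces A's preallocated 1052-slot array with the telescoped three-term update iv[n]=2*iv[n-1]-iv[n-2]+iv[n-51] by a growing list driven by the natural counting recurrence f[n]=f[n-1]+sum(f[0..n-51]) with an explicit inner summation pass.
import Mathlib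
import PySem

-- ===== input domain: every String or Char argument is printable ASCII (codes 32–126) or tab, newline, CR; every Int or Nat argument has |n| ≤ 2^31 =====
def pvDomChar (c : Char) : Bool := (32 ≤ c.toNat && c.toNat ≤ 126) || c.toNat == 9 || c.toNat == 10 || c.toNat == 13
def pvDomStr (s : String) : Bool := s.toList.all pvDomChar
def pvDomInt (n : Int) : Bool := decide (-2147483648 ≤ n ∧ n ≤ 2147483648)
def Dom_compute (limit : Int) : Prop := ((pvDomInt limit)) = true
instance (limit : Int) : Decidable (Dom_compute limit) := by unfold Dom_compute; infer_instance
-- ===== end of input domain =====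

-- B replaces A's telescoped three-term array update by the natural counting
-- recurrence with an explicit inner summation over the growing list (objective:
-- alternative decomposition; equivalence proved for all Int inputs).

-- ===== PORT A =====
-- iv = [1 for x in range(0,51)] + [2] + [0 for x in range(0,1000)]
def pvIvInit : List Int :=
  ((PySem.List.pyRange 0 51 1).map (fun _ => (1 : Int))) ++ [(2 : Int)] ++
  ((PySem.List.pyRange 0 1000 1).map (fun _ => (0 : Int)))

-- the while-True loop; n stays ≥ 51 so Nat subtraction is exact; indices read
-- are < n ≤ 1051 < iv.length, so getD is exact.  Fuel = remaining capacity of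
-- the 1052-entry array: fuel 0 corresponds to Python running past the array
-- (an IndexError), which for |limit| ≤ 2^31 is unreachable.
def pvLoopA (limit : Int) (iv : List Int) (n : Nat) : Nat → Int × Int
  | 0 => (0, 0)
  | fuel + 1 =>
    let v := 2 * iv.getD (n - 1) 0 - iv.getD (n - 2) 0 + iv.getD (n - 51) 0
    let iv' := iv.set n v
    if v > limit then ((n : Int) - 1, iv'.getD n 0)
    else pvLoopA limit iv' (n + 1) fuel

def compute (limit : Int) : Int × Int := pvLoopA limit pvIvInit 51 1001

-- ===== PORT B =====
-- f[n-1] and f[:n-50] with n ≥ 51: nonnegative in-range index/slice, so getD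
-- and take are exact.  Same fuel convention as port A's loop.
def pvLoopB (limit : Int) (f : List Int) (n : Nat) : Nat → Int × Int
  | 0 => (0, 0)
  | fuel + 1 =>
    let v := f.getD (n - 1) 0 + (f.take (n - 50)).sum
    let f' := f ++ [v]
    if v > limit then ((n : Int) - 1, v)
    else pvLoopB limit f' (n + 1) fuel

def compute_alt (limit : Int) : Int × Int := pvLoopB limit (List.replicate 51 (1 : Int)) 51 1001

-- ===== PRECONDITION & SPEC =====
def Spec_compute (limit : Int) (out : Int × Int) : Prop := out = compute_alt limit
instance (limit : Int) (out : Int × Int) : Decidable (Spec_compute limit out) := by unfold Spec_compute; infer_instance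

-- ===== CLAIM (what is proved, stated in full; the proofs are below) =====
def Claim_equal_compute : Prop := ∀ (limit : Int), Dom_compute limit → Spec_compute limit (compute limit)

-- ===== LEMMAS AND PROOFS =====

set_option maxRecDepth 20000 in
lemma pvIvInit_length : pvIvInit.length = 1052 := by decide

lemma pvIvInit_agree : ∀ i, i < 51 → pvIvInit.getD i 0 = (List.replicate 51 (1 : Int)).getD i 0 := by decide

lemma pvInit_telescope :
    (List.replicate 51 (1 : Int)).getD (51 - 1) 0 - (List.replicate 51 (1 : Int)).getD (51 - 2) 0
      + (List.replicate 51 (1 : Int)).getD (51 - 51) 0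
    = ((List.replicate 51 (1 : Int)).take (51 - 50)).sum := by decide

lemma pvLoop_eq (fuel : Nat) : ∀ (n : Nat) (iv f : List Int) (limit : Int),
    51 ≤ n → n + fuel ≤ 1052 → iv.length = 1052 → f.length = n →
    (∀ i, i < n → iv.getD i 0 = f.getD i 0) →
    (f.getD (n - 1) 0 - f.getD (n - 2) 0 + f.getD (n - 51) 0 = (f.take (n - 50)).sum) →
    pvLoopA limit iv n fuel = pvLoopB limit f n fuel := by
  induction fuel with
  | zero => intros; rfl
  | succ fuel ih =>
    intro n iv f limit h51 hcap hlen hflen hag htel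
    have hn1052 : n < 1052 := by omega
    have hv : 2 * iv.getD (n - 1) 0 - iv.getD (n - 2) 0 + iv.getD (n - 51) 0
        = f.getD (n - 1) 0 + (f.take (n - 50)).sum := by
      rw [hag (n - 1) (by omega), hag (n - 2) (by omega), hag (n - 51) (by omega)]
      have := htel
      omega
    simp only [pvLoopA, pvLoopB, hv]
    set v := f.getD (n - 1) 0 + (f.take (n - 50)).sum with hvdef
    by_cases hlim : v > limit
    · simp only [hlim, if_pos]
      have : (iv.set n v).getD n 0 = v := by
        simp [List.getD_eq_getElem?_getD, hlen, hn1052]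
      rw [this]
    · simp only [hlim, if_neg, not_false_iff]
      apply ih (n + 1) (iv.set n v) (f ++ [v]) limit (by omega) (by omega)
        (by simp [hlen]) (by simp [hflen])
      · -- agreement on the first n+1 entries
        intro i hi
        by_cases hin : i = n
        · subst hin
          have h1 : (iv.set i v).getD i 0 = v := by
            simp [List.getD_eq_getElem?_getD, hlen, hn1052]
          have h2 : (f ++ [v]).getD i 0 = v := by
            have : i = f.length := by omega
            subst this
            simp [List.getD_eq_getElem?_getD]
          rw [h1, h2]
        · have hi' : i < n := by omega
          have h1 : (iv.set n v).getD i 0 = iv.getD i 0 := by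
            simp [List.getD_eq_getElem?_getD, List.getElem?_set_ne (by omega : n ≠ i)]
          have h2 : (f ++ [v]).getD i 0 = f.getD i 0 := by
            simp [List.getD_eq_getElem?_getD, List.getElem?_append_left (by omega : i < f.length)]
          rw [h1, h2, hag i hi']
      · -- telescoping identity at n+1
        have e1 : (f ++ [v]).getD (n + 1 - 1) 0 = v := by
          have : n + 1 - 1 = f.length := by omega
          rw [this]
          simp [List.getD_eq_getElem?_getD]
        have e2 : (f ++ [v]).getD (n + 1 - 2) 0 = f.getD (n - 1) 0 := by
          have : n + 1 - 2 = n - 1 := by omega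
          rw [this]
          simp [List.getD_eq_getElem?_getD, List.getElem?_append_left (by omega : n - 1 < f.length)]
        have e3 : (f ++ [v]).getD (n + 1 - 51) 0 = f.getD (n - 50) 0 := by
          have : n + 1 - 51 = n - 50 := by omega
          rw [this]
          simp [List.getD_eq_getElem?_getD, List.getElem?_append_left (by omega : n - 50 < f.length)]
        have e4 : ((f ++ [v]).take (n + 1 - 50)).sum
            = (f.take (n - 50)).sum + f.getD (n - 50) 0 := by
          have h49 : n + 1 - 50 = (n - 50) + 1 := by omega
          rw [h49, List.take_append_of_le_length (by omega : n - 50 + 1 ≤ f.length),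
            List.sum_take_succ f (n - 50) (by omega)]
          simp [List.getD_eq_getElem?_getD, List.getElem?_eq_getElem (by omega : n - 50 < f.length)]
        rw [e1, e2, e3, e4]
        omega

theorem pv_main : ∀ limit : Int, compute limit = compute_alt limit := by
  intro limit
  unfold compute compute_alt
  exact pvLoop_eq 1001 51 pvIvInit (List.replicate 51 1) limit (by omega) (by omega)
    pvIvInit_length (by simp) pvIvInit_agree pvInit_telescope

-- ===== VERDICT (by name: the statement is the Claim_ definition above) =====
theorem compute_spec : Claim_equal_compute := by
  intro limit _
  unfold Spec_compute
  exact pv_main limit
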